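-- pv_equiv track=rewrite | github.com/sonjuhyeon/programmers_coding_test | 프로그래머스/2/389480. 완전범죄/완전범죄.py | solution
-- ===== SOURCE A (Python) =====
-- from collections import deque
--
-- def solution(info, n, m):
--     answer = 0
--     info = deque(info)
--     vestiges_lst = deque([])
--
--     if info[0][0] < n:
--         vestiges_lst.append([info[0][0], 0])
--     if info[0][1] < m:
--         vestiges_lst.append([0, info[0][1]])
--     if not vestiges_lst:
--         return -1
--
--     info.popleft()
--
--     while info:
--         inf = info.popleft()
--         new_vestiges_lst = set() # 중복 방지를 위한 set
--
--         while vestiges_lst: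
--             a, b = vestiges_lst.popleft()
--             if a + inf[0] < n:
--                 new_vestiges_lst.add((a + inf[0], b))
--             if b + inf[1] < m:
--                 new_vestiges_lst.add((a, b + inf[1]))
--
--         vestiges_lst.extend(new_vestiges_lst) # 새로운 흔적 리스트 큐에 추가
--
--     a_vestiges = [row[0] for row in vestiges_lst]
--
--     return min(a_vestiges) if a_vestiges else -1
-- ===== SOURCE B (Python) =====
-- def solution(info, n, m):
--     # dp maps b-trace value -> minimum achievable a-trace among reachable states
--     dp = {0: 0}
--     for x, y, *_ in info:
--         ndp = {}
--         for b, a in dp.items():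
--             if a + x < n:
--                 if b not in ndp or ndp[b] > a + x:
--                     ndp[b] = a + x
--             nb = b + y
--             if nb < m:
--                 if nb not in ndp or ndp[nb] > a:
--                     ndp[nb] = a
--         dp = ndp
--     return min(dp.values()) if dp else -1
-- ===== Notes on version B (the rewrite author's own statement) =====
-- stated objective: faster
-- what changed: A carries the full breadth-first set of reachable (a-trace, b-trace) pairs per item; B keeps a dictionary mapping each reachable b-trace to the minimum a-trace (knapsack DP), collapsing the a-dimension, and returns the minimum dictionary value.
-- outside the precondition, e.g. on solution([[5, 5], [9]], 1, 1): A returns -1, B raises ValueError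
import Mathlib
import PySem

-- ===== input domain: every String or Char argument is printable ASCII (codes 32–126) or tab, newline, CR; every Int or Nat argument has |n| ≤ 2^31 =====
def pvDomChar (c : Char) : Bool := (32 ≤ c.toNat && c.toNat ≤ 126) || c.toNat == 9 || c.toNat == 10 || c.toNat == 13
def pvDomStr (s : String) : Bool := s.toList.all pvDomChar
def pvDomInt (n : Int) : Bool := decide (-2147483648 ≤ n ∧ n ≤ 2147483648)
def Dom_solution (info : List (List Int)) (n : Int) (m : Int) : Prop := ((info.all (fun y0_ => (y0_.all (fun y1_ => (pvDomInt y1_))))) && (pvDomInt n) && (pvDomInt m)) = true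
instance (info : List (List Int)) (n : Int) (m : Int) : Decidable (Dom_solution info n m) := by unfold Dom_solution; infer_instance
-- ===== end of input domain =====

-- B replaces A's breadth-first set of (a,b) states by a dictionary keyed on the b-trace holding
-- the minimum a-trace per key (classic knapsack DP); return value equivalence is proved.

-- shared helper: read inf[0], inf[1] of a row (rows shorter than 2 make Python raise; excluded by Pre_)
def pvRowXY (row : List Int) : Int × Int :=
  match row with
  | x :: y :: _ => (x, y)
  | [x] => (x, 0)
  | [] => (0, 0)

-- ===== PORT A =====
-- inner 'while vestiges_lst' loop: rebuild the state set for one item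
def pvStepA (n m x y : Int) (S : List (Int × Int)) : PySem.Set (Int × Int) :=
  S.foldl (fun acc p =>
    let acc1 := if p.1 + x < n then PySem.Set.add acc (p.1 + x, p.2) else acc
    if p.2 + y < m then PySem.Set.add acc1 (p.1, p.2 + y) else acc1) PySem.Set.empty

-- outer 'while info' loop
def pvLoopA (n m : Int) : List (List Int) → List (Int × Int) → List (Int × Int)
  | [], S => S
  | row :: rest, S => pvLoopA n m rest (pvStepA n m (pvRowXY row).1 (pvRowXY row).2 S)

def solution (info : List (List Int)) (n : Int) (m : Int) : Int :=
  match info with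
  | [] => -1  -- Python raises IndexError on info[0]: excluded by Pre_
  | first :: rest =>
    let x := (pvRowXY first).1
    let y := (pvRowXY first).2
    let v0 : List (Int × Int) := if x < n then [(x, 0)] else []
    let v1 : List (Int × Int) := if y < m then v0 ++ [(0, y)] else v0
    if v1 = [] then -1
    else
      let final := pvLoopA n m rest v1
      match PySem.List.min? (final.map (·.1)) (fun z => z) with
      | some v => v
      | none => -1

-- ===== PORT B =====
-- 'if k not in ndp or ndp[k] > v: ndp[k] = v'
def pvUpd (d : PySem.Dict Int Int) (k v : Int) : PySem.Dict Int Int :=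
  if d.contains k = false ∨ d.getD k 0 > v then d.insert k v else d

-- one item of the DP: build ndp from dp.items
def pvStepB (n m x y : Int) (dp : PySem.Dict Int Int) : PySem.Dict Int Int :=
  dp.items.foldl (fun ndp p =>
    let ndp1 := if p.2 + x < n then pvUpd ndp p.1 (p.2 + x) else ndp
    if p.1 + y < m then pvUpd ndp1 (p.1 + y) p.2 else ndp1) PySem.Dict.empty

def solution_alt (info : List (List Int)) (n : Int) (m : Int) : Int :=
  let dp0 : PySem.Dict Int Int := PySem.Dict.insert PySem.Dict.empty 0 0
  let dp := info.foldl (fun dp row => pvStepB n m (pvRowXY row).1 (pvRowXY row).2 dp) dp0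
  match PySem.List.min? dp.values (fun z => z) with
  | some v => v
  | none => -1

-- ===== PRECONDITION & SPEC =====
-- Pre_ excludes malformed inputs: empty info (A raises IndexError on info[0]) and rows shorter
-- than 2, on which A usually raises too (inf[1]) but can return -1 first when no state survives
-- the earlier rows, while B's row unpacking raises.
def Pre_solution (info : List (List Int)) (_n : Int) (_m : Int) : Prop :=
  info ≠ [] ∧ ∀ row ∈ info, 2 ≤ row.length
instance (info : List (List Int)) (n : Int) (m : Int) : Decidable (Pre_solution info n m) := by
  unfold Pre_solution; infer_instance
def pvWitness_solution : List (List Int) × Int × Int := ([[1, 2], [3, 1]], 5, 5)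

def Spec_solution (info : List (List Int)) (n : Int) (m : Int) (out : Int) : Prop := out = solution_alt info n m
instance (info : List (List Int)) (n : Int) (m : Int) (out : Int) : Decidable (Spec_solution info n m out) := by unfold Spec_solution; infer_instance

-- ===== CLAIM (what is proved, stated in full; the proofs are below) =====
def Claim_equal_solution : Prop := ∀ (info : List (List Int)) (n : Int) (m : Int), Dom_solution info n m → Pre_solution info n m → Spec_solution info n m (solution info n m)

-- ===== LEMMAS AND PROOFS =====

-- the invariant: dp stores, per b-trace, the minimum a-trace among A's states S
def pvInv (S : List (Int × Int)) (dp : PySem.Dict Int Int) : Prop :=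
  dp.keys.Nodup ∧ ∀ b : Int,
    (dp.get? b = none → ∀ a, (a, b) ∉ S) ∧
    (∀ v, dp.get? b = some v → (v, b) ∈ S ∧ ∀ a, (a, b) ∈ S → v ≤ a)

lemma mem_pvStepA (n m x y : Int) (S : List (Int × Int)) (q : Int × Int) :
    q ∈ pvStepA n m x y S ↔
      ∃ p ∈ S, (q = (p.1 + x, p.2) ∧ p.1 + x < n) ∨ (q = (p.1, p.2 + y) ∧ p.2 + y < m) := by
  have gen : ∀ (S : List (Int × Int)) (acc : PySem.Set (Int × Int)),
      q ∈ S.foldl (fun acc p =>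
        let acc1 := if p.1 + x < n then PySem.Set.add acc (p.1 + x, p.2) else acc
        if p.2 + y < m then PySem.Set.add acc1 (p.1, p.2 + y) else acc1) acc ↔
      q ∈ acc ∨ ∃ p ∈ S, (q = (p.1 + x, p.2) ∧ p.1 + x < n) ∨ (q = (p.1, p.2 + y) ∧ p.2 + y < m) := by
    intro S
    induction S with
    | nil => intro acc; simp
    | cons p S ih =>
      intro acc
      rw [List.foldl_cons, ih]
      constructor
      · rintro (hq | ⟨p', hp', hc⟩)
        · dsimp only at hq
          split_ifs at hq with h1 h2 h2 <;>
            try simp only [PySem.Set.mem_add] at hq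
          all_goals first
            | exact Or.inl hq
            | (rcases hq with hq | hq <;> first
              | (rcases hq with hq | hq
                 · exact Or.inl hq
                 · exact Or.inr ⟨p, List.mem_cons_self, by tauto⟩)
              | exact Or.inl hq
              | exact Or.inr ⟨p, List.mem_cons_self, by tauto⟩)
        · exact Or.inr ⟨p', List.mem_cons_of_mem _ hp', hc⟩
      · rintro (hq | ⟨p', hp', hc⟩)
        · left; dsimp only
          split_ifs <;> (try simp only [PySem.Set.mem_add]) <;> tauto
        · rcases List.mem_cons.1 hp' with rfl | hp'
          · left; dsimp only
            rcases hc with ⟨rfl, hlt⟩ | ⟨rfl, hlt⟩ <;>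
              split_ifs <;> (try simp only [PySem.Set.mem_add]) <;> tauto
          · exact Or.inr ⟨p', hp', hc⟩
  rw [pvStepA, gen]
  simp [PySem.Set.empty]

lemma get?_pvUpd_self (d : PySem.Dict Int Int) (k v : Int) :
    (pvUpd d k v).get? k = some (min ((d.get? k).getD v) v) := by
  unfold pvUpd
  rcases h : d.get? k with _ | w
  · have hc : d.contains k = false := by
      rw [PySem.Dict.contains_eq_isSome_get?, h]; rfl
    simp [hc]
  · have hc : d.contains k = true := by
      rw [PySem.Dict.contains_eq_isSome_get?, h]; rfl
    have hg : d.getD k 0 = w := by rw [PySem.Dict.getD_eq_get?_getD, h]; rfl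
    by_cases hw : w > v
    · have : min w v = v := by omega
      simp [hc, hg, hw, this]
    · have : min w v = w := by omega
      simp [hc, hg, hw, h, this]

lemma get?_pvUpd_of_ne (d : PySem.Dict Int Int) (k v k' : Int) (h : k' ≠ k) :
    (pvUpd d k v).get? k' = d.get? k' := by
  unfold pvUpd
  split_ifs with hc
  · simp [PySem.Dict.get?_insert, h]
  · rfl

lemma nodup_keys_pvUpd (d : PySem.Dict Int Int) (k v : Int) (h : d.keys.Nodup) :
    (pvUpd d k v).keys.Nodup := by
  unfold pvUpd
  split_ifs with hc
  · exact PySem.Dict.nodup_keys_insert d k v h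
  · exact h

-- candidate contributions of one dp item (b, w) to key b'
def pvCands (n m x y b' : Int) (p : Int × Int) : List Int :=
  (if p.2 + x < n ∧ b' = p.1 then [p.2 + x] else []) ++
  (if p.1 + y < m ∧ b' = p.1 + y then [p.2] else [])

def pvOmin (o : Option Int) (v : Int) : Option Int := some (min (o.getD v) v)

lemma get?_innerB (n m x y b' : Int) (l : List (Int × Int)) (ndp : PySem.Dict Int Int) :
    (l.foldl (fun ndp p =>
      let ndp1 := if p.2 + x < n then pvUpd ndp p.1 (p.2 + x) else ndp
      if p.1 + y < m then pvUpd ndp1 (p.1 + y) p.2 else ndp1) ndp).get? b'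
    = (l.flatMap (pvCands n m x y b')).foldl pvOmin (ndp.get? b') := by
  have helper : ∀ (d : PySem.Dict Int Int) (cond : Prop) [Decidable cond] (k v : Int),
      (if cond then pvUpd d k v else d).get? b'
        = (if cond ∧ b' = k then [v] else []).foldl pvOmin (d.get? b') := by
    intro d cond _ k v
    by_cases hc : cond
    · by_cases he : b' = k
      · subst he
        simp [hc, get?_pvUpd_self d b' v, pvOmin]
      · simp [hc, he, get?_pvUpd_of_ne d k v b' he]
    · simp [hc]
  induction l generalizing ndp with
  | nil => simp
  | cons p l ih =>
    rw [List.foldl_cons, ih, List.flatMap_cons, List.foldl_append]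
    congr 1
    dsimp only
    rw [helper, helper, ← List.foldl_append]
    rfl

lemma foldl_pvOmin_none_iff (l : List Int) (o : Option Int) :
    l.foldl pvOmin o = none ↔ o = none ∧ l = [] := by
  induction l generalizing o with
  | nil => simp
  | cons v l ih =>
    rw [List.foldl_cons, ih]
    simp [pvOmin]

lemma foldl_pvOmin_some (l : List Int) (o : Option Int) (r : Int)
    (h : l.foldl pvOmin o = some r) :
    (o = some r ∨ r ∈ l) ∧ (∀ w, o = some w → r ≤ w) ∧ ∀ v ∈ l, r ≤ v := by
  induction l generalizing o with
  | nil =>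
    simp only [List.foldl_nil] at h
    subst h
    exact ⟨Or.inl rfl, fun w hw => by injection hw with hw; omega, by simp⟩
  | cons v l ih =>
    rw [List.foldl_cons] at h
    obtain ⟨h1, h2, h3⟩ := ih _ h
    have hr : r ≤ min (o.getD v) v := h2 _ rfl
    constructor
    · rcases h1 with h1 | h1
      · simp only [pvOmin, Option.some.injEq] at h1
        rcases o with _ | w
        · simp only [Option.getD_none] at h1
          exact Or.inr (List.mem_cons.2 (Or.inl (by omega)))
        · simp only [Option.getD_some] at h1
          rcases min_cases w v with ⟨he, _⟩ | ⟨he, _⟩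
          · left; rw [← h1, he]
          · right; exact List.mem_cons.2 (Or.inl (by omega))
      · exact Or.inr (List.mem_cons_of_mem _ h1)
    · refine ⟨fun w hw => ?_, fun u hu => ?_⟩
      · subst hw
        simp only [Option.getD_some] at hr
        omega
      · rcases List.mem_cons.1 hu with rfl | hu
        · have : min (o.getD u) u ≤ u := min_le_right _ _
          omega
        · exact h3 u hu

lemma pvStep_inv (n m x y : Int) (S : List (Int × Int)) (dp : PySem.Dict Int Int)
    (h : pvInv S dp) : pvInv (pvStepA n m x y S) (pvStepB n m x y dp) := by
  obtain ⟨hnd, hinv⟩ := h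
  have hkey : ∀ a b, (a, b) ∈ S → ∃ w, dp.get? b = some w ∧ w ≤ a := by
    intro a b hab
    rcases hg : dp.get? b with _ | w
    · exact absurd hab ((hinv b).1 hg a)
    · exact ⟨w, rfl, ((hinv b).2 w hg).2 a hab⟩
  have hndB : (pvStepB n m x y dp).keys.Nodup := by
    have gen : ∀ (l : List (Int × Int)) (ndp : PySem.Dict Int Int), ndp.keys.Nodup →
        (l.foldl (fun ndp p =>
          let ndp1 := if p.2 + x < n then pvUpd ndp p.1 (p.2 + x) else ndp
          if p.1 + y < m then pvUpd ndp1 (p.1 + y) p.2 else ndp1) ndp).keys.Nodup := by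
      intro l
      induction l with
      | nil => intro ndp hn; exact hn
      | cons p l ih =>
        intro ndp hn
        rw [List.foldl_cons]
        apply ih
        dsimp only
        split_ifs <;>
          first
          | exact nodup_keys_pvUpd _ _ _ (nodup_keys_pvUpd _ _ _ hn)
          | exact nodup_keys_pvUpd _ _ _ hn
          | exact hn
    exact gen dp.items PySem.Dict.empty PySem.Dict.nodup_keys_empty
  refine ⟨hndB, fun b' => ?_⟩
  have hget' : (pvStepB n m x y dp).get? b'
      = (dp.items.flatMap (pvCands n m x y b')).foldl pvOmin none := by
    have hg := get?_innerB n m x y b' dp.items PySem.Dict.empty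
    rw [PySem.Dict.get?_empty] at hg
    exact hg
  have cand_of_state : ∀ a' a b, (a, b) ∈ S →
      ((a' = a + x ∧ b' = b) ∧ a + x < n) ∨ ((a' = a ∧ b' = b + y) ∧ b + y < m) →
      ∃ c ∈ dp.items.flatMap (pvCands n m x y b'), c ≤ a' := by
    intro a' a b hab hmove
    obtain ⟨w, hw, hwa⟩ := hkey a b hab
    have hitem : (b, w) ∈ dp.items := PySem.Dict.mem_items_of_get?_eq_some dp hw
    rcases hmove with ⟨⟨ha', hb'⟩, hlt⟩ | ⟨⟨ha', hb'⟩, hlt⟩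
    · refine ⟨w + x, List.mem_flatMap.2 ⟨(b, w), hitem, ?_⟩, by omega⟩
      unfold pvCands
      have hwx : w + x < n := by omega
      simp [hwx, hb']
    · refine ⟨w, List.mem_flatMap.2 ⟨(b, w), hitem, ?_⟩, by omega⟩
      unfold pvCands
      simp [hlt, hb']
  constructor
  · intro hn a' ha'
    rw [hget'] at hn
    obtain ⟨-, hL⟩ := (foldl_pvOmin_none_iff _ _).1 hn
    rw [mem_pvStepA] at ha'
    obtain ⟨p, hp, hc⟩ := ha'
    simp only [Prod.mk.injEq] at hc
    obtain ⟨c, hcL, -⟩ := cand_of_state a' p.1 p.2 (by simpa using hp) (by tauto)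
    rw [hL] at hcL
    exact absurd hcL List.not_mem_nil
  · intro v hv
    rw [hget'] at hv
    obtain ⟨h1, -, h3⟩ := foldl_pvOmin_some _ _ _ hv
    rcases h1 with h1 | h1
    · cases h1
    constructor
    · obtain ⟨⟨b, w⟩, hitem, hcand⟩ := List.mem_flatMap.1 h1
      have hw : dp.get? b = some w := PySem.Dict.get?_of_mem_items dp hitem hnd
      have hwS : (w, b) ∈ S := ((hinv b).2 w hw).1
      unfold pvCands at hcand
      rw [mem_pvStepA]
      simp only [List.mem_append] at hcand
      rcases hcand with hc | hc
      · split_ifs at hc with hcc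
        · simp only [List.mem_singleton] at hc
          subst hc
          exact ⟨(w, b), hwS, Or.inl ⟨by simp [hcc.2], hcc.1⟩⟩
        · exact absurd hc List.not_mem_nil
      · split_ifs at hc with hcc
        · simp only [List.mem_singleton] at hc
          rw [hc]
          exact ⟨(w, b), hwS, Or.inr ⟨by simp [hcc.2], hcc.1⟩⟩
        · exact absurd hc List.not_mem_nil
    · intro a ha
      rw [mem_pvStepA] at ha
      obtain ⟨p, hp, hc⟩ := ha
      simp only [Prod.mk.injEq] at hc
      obtain ⟨c, hcL, hca⟩ := cand_of_state a p.1 p.2 (by simpa using hp) (by tauto)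
      exact le_trans (h3 c hcL) hca

lemma pvInv_congr (S S' : List (Int × Int)) (dp : PySem.Dict Int Int)
    (hmem : ∀ q, q ∈ S ↔ q ∈ S') (h : pvInv S dp) : pvInv S' dp := by
  refine ⟨h.1, fun b => ⟨fun hn a ha => (h.2 b).1 hn a ((hmem _).2 ha),
    fun v hv => ⟨(hmem _).1 ((h.2 b).2 v hv).1,
      fun a ha => ((h.2 b).2 v hv).2 a ((hmem _).2 ha)⟩⟩⟩

lemma pvLoop_inv (n m : Int) (rest : List (List Int)) (S : List (Int × Int))
    (dp : PySem.Dict Int Int) (h : pvInv S dp) :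
    pvInv (pvLoopA n m rest S)
      (rest.foldl (fun dp row => pvStepB n m (pvRowXY row).1 (pvRowXY row).2 dp) dp) := by
  induction rest generalizing S dp with
  | nil => exact h
  | cons row rest ih =>
    simp only [pvLoopA, List.foldl_cons]
    exact ih _ _ (pvStep_inv _ _ _ _ _ _ h)

lemma pvFinal_eq (S : List (Int × Int)) (dp : PySem.Dict Int Int) (h : pvInv S dp) :
    (match PySem.List.min? (S.map (·.1)) (fun z => z) with
     | some v => v | none => (-1 : Int))
    = (match PySem.List.min? dp.values (fun z => z) with
       | some v => v | none => (-1 : Int)) := by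
  obtain ⟨hnd, hinv⟩ := h
  rcases hA : PySem.List.min? (S.map (·.1)) (fun z => z) with _ | va <;>
    rcases hB : PySem.List.min? dp.values (fun z => z) with _ | vb
  · rw [hA]
  · rw [PySem.List.min?_eq_none_iff] at hA
    have hS : S = [] := List.map_eq_nil_iff.1 hA
    have hvb := PySem.List.min?_mem hB
    simp only [PySem.Dict.values] at hvb
    obtain ⟨⟨k, w⟩, hk, hw⟩ := List.mem_map.1 hvb
    have hget : dp.get? k = some w := PySem.Dict.get?_of_mem_items dp hk hnd
    have : (w, k) ∈ S := ((hinv k).2 w hget).1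
    rw [hS] at this
    exact absurd this List.not_mem_nil
  · rw [PySem.List.min?_eq_none_iff] at hB
    have hitems : dp.items = [] := by
      have := hB
      simp only [PySem.Dict.values] at this
      exact List.map_eq_nil_iff.1 this
    have hva := PySem.List.min?_mem hA
    obtain ⟨p, hpS, hp1⟩ := List.mem_map.1 hva
    have hn : dp.get? p.2 = none := by
      rw [PySem.Dict.get?_eq_none_iff_not_mem_keys]
      simp [PySem.Dict.keys, hitems]
    exact absurd (show (p.1, p.2) ∈ S from by simpa using hpS) ((hinv p.2).1 hn p.1)
  · rw [hA]
    show va = vb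
    have hva_min := PySem.List.min?_isMin hA
    have hvb_min := PySem.List.min?_isMin hB
    -- vb is an A-trace of a state of S
    have hvb_mem := PySem.List.min?_mem hB
    simp only [PySem.Dict.values] at hvb_mem
    obtain ⟨⟨k, w⟩, hk, hw⟩ := List.mem_map.1 hvb_mem
    have hget : dp.get? k = some w := PySem.Dict.get?_of_mem_items dp hk hnd
    have hwS : (w, k) ∈ S := ((hinv k).2 w hget).1
    have h1 : va ≤ vb := by
      have := hva_min vb (List.mem_map.2 ⟨(w, k), hwS, by simpa using hw⟩)
      simpa using this
    -- va is witnessed by a state, dominated by a dp value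
    have hva_mem := PySem.List.min?_mem hA
    obtain ⟨p, hpS, hp1⟩ := List.mem_map.1 hva_mem
    rcases hg : dp.get? p.2 with _ | w'
    · exact absurd (show (p.1, p.2) ∈ S from by simpa using hpS) ((hinv p.2).1 hg p.1)
    · have hw'le : w' ≤ p.1 := ((hinv p.2).2 w' hg).2 p.1 (by simpa using hpS)
      have hw'v : w' ∈ dp.values := by
        simp only [PySem.Dict.values]
        exact List.mem_map.2 ⟨(p.2, w'), PySem.Dict.mem_items_of_get?_eq_some dp hg, rfl⟩
      have h2 : vb ≤ w' := by simpa using hvb_min w' hw'v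
      omega

lemma pvLoopA_nil (n m : Int) (rest : List (List Int)) : pvLoopA n m rest [] = [] := by
  induction rest with
  | nil => rfl
  | cons row rest ih => simpa only [pvLoopA] using ih

lemma pvInv_nil_values (dp : PySem.Dict Int Int) (h : pvInv [] dp) :
    PySem.List.min? dp.values (fun z => z) = none := by
  rcases hB : PySem.List.min? dp.values (fun z => z) with _ | v
  · rfl
  · have hv := PySem.List.min?_mem hB
    simp only [PySem.Dict.values] at hv
    obtain ⟨⟨k, w⟩, hk, hw⟩ := List.mem_map.1 hv
    have hget : dp.get? k = some w := PySem.Dict.get?_of_mem_items dp hk h.1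
    exact absurd ((h.2 k).2 w hget).1 List.not_mem_nil

-- ===== VERDICT (by name: the statement is the Claim_ definition above) =====
theorem solution_spec : Claim_equal_solution := by
  unfold Claim_equal_solution
  intro info n m hdom hpre
  unfold Spec_solution
  obtain ⟨hne, hlen⟩ := hpre
  cases info with
  | nil => exact absurd rfl hne
  | cons first rest =>
    -- base invariant for the virtual start state {(0,0)} and dp0 = {0: 0}
    have hinv0 : pvInv [((0 : Int), (0 : Int))] (PySem.Dict.insert PySem.Dict.empty 0 0) := by
      refine ⟨PySem.Dict.nodup_keys_insert _ _ _ PySem.Dict.nodup_keys_empty, fun b => ?_⟩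
      constructor
      · intro hn a ha
        simp only [List.mem_singleton, Prod.mk.injEq] at ha
        rw [PySem.Dict.get?_insert] at hn
        simp [ha.2] at hn
      · intro v hv
        rw [PySem.Dict.get?_insert] at hv
        by_cases hb : b = 0
        · subst hb
          simp at hv
          subst hv
          exact ⟨List.mem_singleton.2 rfl, fun a ha => by
            simp only [List.mem_singleton, Prod.mk.injEq] at ha; omega⟩
        · rw [if_neg hb, PySem.Dict.get?_empty] at hv
          cases hv
    have hinv1 := pvStep_inv n m (pvRowXY first).1 (pvRowXY first).2 _ _ hinv0
    -- membership of the step applied to {(0,0)} = A's initial vestige list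
    have hmem1 : ∀ q, q ∈ pvStepA n m (pvRowXY first).1 (pvRowXY first).2 [((0 : Int), (0 : Int))]
        ↔ q ∈ (if (pvRowXY first).2 < m then
                (if (pvRowXY first).1 < n then [((pvRowXY first).1, (0 : Int))] else []) ++ [((0 : Int), (pvRowXY first).2)]
              else (if (pvRowXY first).1 < n then [((pvRowXY first).1, (0 : Int))] else [])) := by
      intro q
      rw [mem_pvStepA]
      constructor
      · rintro ⟨p, hp, hc⟩
        simp only [List.mem_singleton] at hp
        subst hp
        rcases hc with ⟨rfl, hlt⟩ | ⟨rfl, hlt⟩ <;> rw [zero_add] at hlt <;> rw [zero_add] <;>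
          split_ifs with hm <;> simp_all
      · intro hq
        split_ifs at hq with h2 h1 h1 <;> try simp only [List.mem_append, List.mem_singleton] at hq
        · rcases hq with rfl | rfl
          · exact ⟨(0, 0), List.mem_singleton.2 rfl, Or.inl ⟨by simp, by simpa using h1⟩⟩
          · exact ⟨(0, 0), List.mem_singleton.2 rfl, Or.inr ⟨by simp, by simpa using h2⟩⟩
        · rcases hq with hq | rfl
          · exact absurd hq List.not_mem_nil
          · exact ⟨(0, 0), List.mem_singleton.2 rfl, Or.inr ⟨by simp, by simpa using h2⟩⟩
        · rcases hq with rfl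
          exact ⟨(0, 0), List.mem_singleton.2 rfl, Or.inl ⟨by simp, by simpa using h1⟩⟩
        · exact absurd hq List.not_mem_nil
    -- B's value
    have hB : solution_alt (first :: rest) n m
        = (match PySem.List.min?
            (rest.foldl (fun dp row => pvStepB n m (pvRowXY row).1 (pvRowXY row).2 dp)
              (pvStepB n m (pvRowXY first).1 (pvRowXY first).2
                (PySem.Dict.insert PySem.Dict.empty 0 0))).values (fun z => z) with
           | some v => v | none => (-1 : Int)) := by
      simp only [solution_alt, List.foldl_cons]
    rw [hB]
    show solution (first :: rest) n m = _
    simp only [solution]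
    set V : List (Int × Int) := (if (pvRowXY first).2 < m then
        (if (pvRowXY first).1 < n then [((pvRowXY first).1, (0 : Int))] else []) ++ [((0 : Int), (pvRowXY first).2)]
      else (if (pvRowXY first).1 < n then [((pvRowXY first).1, (0 : Int))] else [])) with hV
    by_cases hemp : V = []
    · rw [if_pos hemp]
      have hinvE : pvInv ([] : List (Int × Int))
          (pvStepB n m (pvRowXY first).1 (pvRowXY first).2 (PySem.Dict.insert PySem.Dict.empty 0 0)) := by
        refine pvInv_congr _ _ _ (fun q => ?_) hinv1
        rw [hmem1 q, hemp]
      have hloop := pvLoop_inv n m rest _ _ hinvE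
      rw [pvLoopA_nil] at hloop
      rw [pvInv_nil_values _ hloop]
    · rw [if_neg hemp]
      have hinvV : pvInv V
          (pvStepB n m (pvRowXY first).1 (pvRowXY first).2 (PySem.Dict.insert PySem.Dict.empty 0 0)) :=
        pvInv_congr _ _ _ hmem1 hinv1
      have hloop := pvLoop_inv n m rest _ _ hinvV
      exact pvFinal_eq _ _ hloop
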